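-- pv_equiv track=rewrite | github.com/yjhouma/My-LeetCode-Journey | 738-MonotoneIncreasingDigits/738-MonotoneIncreasingDigits.py | is_monotone_increasing
-- ===== SOURCE A (Python) =====
-- def is_monotone_increasing(n):
--     dgt = 0
--     while n>1:
--         curr_digit = n%10
--         n = n//10
--         prev_digit = n%10
--         dgt += 1
--         if prev_digit > curr_digit:
--             return False
--
--     return True
-- ===== SOURCE B (Python) =====
-- def is_monotone_increasing(n):
--     if n <= 1:
--         return True
--     s = str(n)
--     return all(a <= b for a, b in zip(s, s[1:]))
-- ===== Notes on version B (the rewrite author's own statement) =====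
-- stated objective: idiomatic
-- what changed: Replaces the remainder/quotient digit-peeling while-loop (least-significant-first with an early return) by the idiomatic Python form: convert to its decimal string once and check all adjacent character pairs left-to-right with all()/zip.
import Mathlib
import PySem

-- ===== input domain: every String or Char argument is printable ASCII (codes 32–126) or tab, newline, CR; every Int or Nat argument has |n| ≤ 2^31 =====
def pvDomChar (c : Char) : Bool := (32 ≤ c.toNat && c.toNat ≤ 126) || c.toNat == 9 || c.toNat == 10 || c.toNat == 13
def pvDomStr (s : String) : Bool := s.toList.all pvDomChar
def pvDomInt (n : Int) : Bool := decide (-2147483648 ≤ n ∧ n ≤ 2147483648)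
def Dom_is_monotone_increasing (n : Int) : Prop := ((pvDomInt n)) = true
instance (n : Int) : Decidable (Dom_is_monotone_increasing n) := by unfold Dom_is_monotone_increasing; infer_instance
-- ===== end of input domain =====

-- B replaces A's remainder/quotient digit-peeling while-loop by the idiomatic string form:
-- str(n) and an all() over adjacent character pairs (same cost, plainer code).

-- ===== PORT A =====
-- the while-loop of A: state (dgt, n); dgt is dead state A carries, kept for faithfulness
def isMonoLoopA (dgt : Int) (n : Int) : Bool :=
  if h : n > 1 then
    let curr_digit := PySem.Int.mod n 10
    let n' := PySem.Int.floordiv n 10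
    let prev_digit := PySem.Int.mod n' 10
    if prev_digit > curr_digit then false else isMonoLoopA (dgt + 1) n'
  else true
termination_by n.toNat
decreasing_by
  have h1 : PySem.Int.floordiv n 10 < n :=
    (PySem.Int.floordiv_lt_iff_lt_mul (by omega)).mpr (by nlinarith)
  omega

def is_monotone_increasing (n : Int) : Bool := isMonoLoopA 0 n

-- ===== PORT B =====
def is_monotone_increasing_alt (n : Int) : Bool :=
  if n ≤ 1 then true
  else
    let s := (PySem.Int.toStr n).toList      -- str(n); on the char-list side (PySem convention)
    (s.zip (s.drop 1)).all (fun p => decide (p.1 ≤ p.2))   -- all(a <= b for a, b in zip(s, s[1:]))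

-- ===== PRECONDITION & SPEC =====
def Spec_is_monotone_increasing (n : Int) (out : Bool) : Prop := out = is_monotone_increasing_alt n
instance (n : Int) (out : Bool) : Decidable (Spec_is_monotone_increasing n out) := by unfold Spec_is_monotone_increasing; infer_instance

-- ===== CLAIM (what is proved, stated in full; the proofs are below) =====
def Claim_equal_is_monotone_increasing : Prop := ∀ (n : Int), Dom_is_monotone_increasing n → Spec_is_monotone_increasing n (is_monotone_increasing n)

-- ===== LEMMAS AND PROOFS =====

-- Nat.toDigits is the reversed digit list rendered through Nat.digitChar
theorem toDigitsCore_eq (f : Nat) : ∀ (m : Nat) (acc : List Char), 0 < m → m < 10 ^ f →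
    Nat.toDigitsCore 10 f m acc = ((Nat.digits 10 m).reverse.map Nat.digitChar) ++ acc := by
  induction f with
  | zero => intro m acc hm hlt; omega
  | succ f ih =>
    intro m acc hm hlt
    rw [Nat.toDigitsCore]
    rw [Nat.digits_def' (b := 10) (by norm_num) hm]
    by_cases h0 : m / 10 = 0
    · simp [h0]
    · have hdiv : m / 10 < 10 ^ f := Nat.div_lt_of_lt_mul (by rw [pow_succ] at hlt; omega)
      simp only [h0, if_false]
      rw [ih (m / 10) _ (Nat.pos_of_ne_zero h0) hdiv]
      simp

theorem toDigits_eq (m : Nat) (hm : 0 < m) :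
    Nat.toDigits 10 m = ((Nat.digits 10 m).reverse.map Nat.digitChar) := by
  have hlt : m < 10 ^ (m + 1) := by
    calc m < 10 ^ m := Nat.lt_pow_self (by norm_num)
      _ ≤ 10 ^ (m + 1) := Nat.pow_le_pow_right (by norm_num) (by omega)
  simpa using toDigitsCore_eq (m + 1) m [] hm hlt

-- B's zip-with-tail all() is the adjacent-pairs chain
theorem zip_all_iff (l : List Char) :
    ((l.zip (l.drop 1)).all (fun p => decide (p.1 ≤ p.2)) = true) ↔ List.IsChain (· ≤ ·) l := by
  induction l with
  | nil => simp
  | cons a t ih =>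
    cases t with
    | nil => simp
    | cons b t' =>
      simp only [List.drop_succ_cons, List.drop_zero, List.zip_cons_cons, List.all_cons,
        Bool.and_eq_true, decide_eq_true_eq, List.isChain_cons_cons] at *
      rw [ih]

-- digitChar compares like the digit, below 10
theorem digitChar_le_iff (a b : Nat) (ha : a < 10) (hb : b < 10) :
    (Nat.digitChar a ≤ Nat.digitChar b) ↔ a ≤ b := by
  interval_cases a <;> interval_cases b <;> decide

-- the chain survives the digitChar rendering, for lists of digits
theorem isChain_digitChar_iff (l : List Nat) (hl : ∀ x ∈ l, x < 10) :
    List.IsChain (fun a b => Nat.digitChar a ≤ Nat.digitChar b) l ↔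
      List.IsChain (fun a b : Nat => a ≤ b) l := by
  induction l with
  | nil => simp
  | cons a t ih =>
    cases t with
    | nil => exact iff_of_true (.singleton _) (.singleton _)
    | cons b t' =>
      rw [List.isChain_cons_cons, List.isChain_cons_cons,
        digitChar_le_iff a b (hl a (by simp)) (hl b (by simp))]
      exact and_congr_right fun _ => ih (fun x hx => hl x (by simp at hx ⊢; tauto))

-- A's loop on a natural: the LSB-first digit list is non-increasing
theorem loopA_iff (m : Nat) : ∀ (d : Int),
    (isMonoLoopA d (m : Int) = true) ↔
      List.IsChain (fun a b : Nat => b ≤ a) (Nat.digits 10 m) := by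
  induction m using Nat.strong_induction_on with
  | _ m ih =>
    intro d
    rw [isMonoLoopA.eq_def]
    by_cases hm : (m : Int) > 1
    · have hm2 : 2 ≤ m := by exact_mod_cast hm
      rw [dif_pos hm]
      have hmod : PySem.Int.mod (m : Int) 10 = ((m % 10 : Nat) : Int) := by
        exact_mod_cast PySem.Int.mod_natCast m 10
      have hdiv : PySem.Int.floordiv (m : Int) 10 = ((m / 10 : Nat) : Int) := by
        exact_mod_cast PySem.Int.floordiv_natCast m 10
      have hmod2 : PySem.Int.mod (((m / 10 : Nat) : Int)) 10 = ((m / 10 % 10 : Nat) : Int) := by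
        exact_mod_cast PySem.Int.mod_natCast (m / 10) 10
      simp only [hmod, hdiv, hmod2]
      rw [Nat.digits_def' (b := 10) (by norm_num) (show 0 < m by omega)]
      by_cases h0 : m / 10 = 0
      · have hno : ¬ (((m / 10 % 10 : Nat) : Int) > ((m % 10 : Nat) : Int)) := by
          omega
        rw [if_neg hno, h0]
        rw [show ((0 : Nat) : Int) = (0 : Int) by norm_num]
        rw [isMonoLoopA.eq_def]
        norm_num
      · have hhead : Nat.digits 10 (m / 10) = (m / 10) % 10 :: Nat.digits 10 (m / 10 / 10) :=
          Nat.digits_def' (b := 10) (by norm_num) (Nat.pos_of_ne_zero h0)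
        by_cases hc : ((m / 10 % 10 : Nat) : Int) > ((m % 10 : Nat) : Int)
        · rw [if_pos hc]
          have hcn : ¬ ((m / 10) % 10 ≤ m % 10) := by exact_mod_cast not_le.mpr hc
          refine iff_of_false (by simp) ?_
          rw [hhead, List.isChain_cons_cons]
          exact fun h => hcn h.1
        · rw [if_neg hc]
          have hcn : (m / 10) % 10 ≤ m % 10 := by
            have := not_lt.mp hc; exact_mod_cast this
          rw [ih (m / 10) (by omega) (d + 1), hhead, List.isChain_cons_cons, ← hhead]
          simp [hcn]
    · have hm1 : m ≤ 1 := by omega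
      rw [dif_neg hm]
      refine iff_of_true rfl ?_
      interval_cases m
      · simp
      · simp

-- ===== VERDICT (by name: the statement is the Claim_ definition above) =====
theorem is_monotone_increasing_spec : Claim_equal_is_monotone_increasing := by
  intro n _
  unfold Spec_is_monotone_increasing is_monotone_increasing is_monotone_increasing_alt
  by_cases hn : n ≤ 1
  · rw [if_pos hn, isMonoLoopA.eq_def, dif_neg (by omega)]
  · rw [if_neg hn]
    obtain ⟨m, rfl⟩ : ∃ m : Nat, n = (m : Int) := ⟨n.toNat, by omega⟩
    have hm2 : 2 ≤ m := by
      have : (2 : Int) ≤ (m : Int) := by omega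
      exact_mod_cast this
    have hchars : (PySem.Int.toStr (m : Int)).toList
        = ((Nat.digits 10 m).reverse.map Nat.digitChar) := by
      rw [PySem.Int.toList_toStr]
      simp only [PySem.Int.toChars, show ¬ ((m : Int) < 0) by omega, if_false, Int.toNat_natCast]
      exact toDigits_eq m (by omega)
    rw [Bool.eq_iff_iff]
    rw [loopA_iff m 0, hchars, zip_all_iff, List.isChain_map, isChain_digitChar_iff _
      (fun x hx => Nat.digits_lt_base (by norm_num) (List.mem_reverse.mp hx))]
    exact (List.isChain_reverse).symm
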